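-- pv_equiv track=rewrite | github.com/nahldi/cladex | backend/bot.py | _parse_verification_claim
-- ===== SOURCE A (Python) =====
-- def _parse_verification_claim(claim: str) -> tuple[str, str] | None:
--     text = claim.strip()
--     mapping = {
--         "file:": "file_exists",
--         "commit:": "commit_exists",
--         "branch:": "branch_exists",
--         "symbol:": "symbol_exists",
--         "diff:": "diff_exists",
--         "tests:": "tests_passed",
--         "decision:": "decision_claim",
--         "ownership:": "ownership_claim",
--         "milestone:": "milestone_completed",
--         "status:": "status_claim",
--     }
--     for prefix, claim_type in mapping.items():
--         if text.startswith(prefix):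
--             return claim_type, text[len(prefix) :].strip()
--     return None
-- ===== SOURCE B (Python) =====
-- def _parse_verification_claim(claim: str) -> tuple[str, str] | None:
--     text = claim.strip()
--     mapping = {
--         "file:": "file_exists",
--         "commit:": "commit_exists",
--         "branch:": "branch_exists",
--         "symbol:": "symbol_exists",
--         "diff:": "diff_exists",
--         "tests:": "tests_passed",
--         "decision:": "decision_claim",
--         "ownership:": "ownership_claim",
--         "milestone:": "milestone_completed",
--         "status:": "status_claim",
--     }
--     idx = text.find(":")
--     if idx == -1:
--         return None
--     claim_type = mapping.get(text[: idx + 1])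
--     if claim_type is None:
--         return None
--     return claim_type, text[idx + 1 :].strip()
-- ===== Notes on version B (the rewrite author's own statement) =====
-- stated objective: simpler
-- what changed: Replaces the linear scan over the prefix table with a single text.find(':') that computes the key directly, followed by one dict lookup; correct because every key is a single-colon-terminated token, so the first colon uniquely determines the candidate prefix.
import Mathlib
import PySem

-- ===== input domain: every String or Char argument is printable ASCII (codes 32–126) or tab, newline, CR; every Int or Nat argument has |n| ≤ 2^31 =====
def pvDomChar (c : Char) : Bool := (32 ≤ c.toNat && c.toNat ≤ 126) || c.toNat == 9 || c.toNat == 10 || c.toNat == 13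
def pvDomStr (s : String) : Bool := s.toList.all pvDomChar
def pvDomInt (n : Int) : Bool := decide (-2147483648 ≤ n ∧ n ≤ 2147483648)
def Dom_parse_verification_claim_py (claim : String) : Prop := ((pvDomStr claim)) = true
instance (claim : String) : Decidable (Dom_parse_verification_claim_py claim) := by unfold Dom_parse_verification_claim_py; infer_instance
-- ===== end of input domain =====

-- B replaces A's linear scan over the prefix table by computing the key from the first ':' and
-- doing a single dict lookup (objective: simpler; return values proved equal on all inputs).

-- ===== PORT A =====
def pvMapping : PySem.Dict String String :=
  PySem.Dict.ofList
    [("file:", "file_exists"), ("commit:", "commit_exists"), ("branch:", "branch_exists"),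
     ("symbol:", "symbol_exists"), ("diff:", "diff_exists"), ("tests:", "tests_passed"),
     ("decision:", "decision_claim"), ("ownership:", "ownership_claim"),
     ("milestone:", "milestone_completed"), ("status:", "status_claim")]

-- the 'for prefix, claim_type in mapping.items(): if text.startswith(prefix): return …' loop
def pvLoopA : List (String × String) → String → Option (String × String)
  | [], _ => none
  | (pfx, claimType) :: rest, text =>
      if PySem.Str.startswith text pfx then
        some (claimType, PySem.Str.strip (PySem.Str.slice text (some (PySem.Str.len pfx)) none))
      else pvLoopA rest text

def parse_verification_claim_py (claim : String) : Option (String × String) :=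
  pvLoopA pvMapping.items (PySem.Str.strip claim)

-- ===== PORT B =====
-- (B uses the same literal mapping table, shared as pvMapping above)
-- B's body after 'text = claim.strip()': idx = text.find(':'); key lookup; tail strip
def pvParseB (text : String) : Option (String × String) :=
  let idx := PySem.Str.find text ":"
  if idx = -1 then none
  else
    match pvMapping.get? (PySem.Str.slice text none (some (idx + 1))) with
    | none => none
    | some claimType =>
        some (claimType, PySem.Str.strip (PySem.Str.slice text (some (idx + 1)) none))

def parse_verification_claim_py_alt (claim : String) : Option (String × String) :=
  pvParseB (PySem.Str.strip claim)

-- ===== PRECONDITION & SPEC =====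
def Spec_parse_verification_claim_py (claim : String) (out : Option (String × String)) : Prop := out = parse_verification_claim_py_alt claim
instance (claim : String) (out : Option (String × String)) : Decidable (Spec_parse_verification_claim_py claim out) := by unfold Spec_parse_verification_claim_py; infer_instance

-- ===== CLAIM (what is proved, stated in full; the proofs are below) =====
def Claim_equal_parse_verification_claim_py : Prop := ∀ (claim : String), Dom_parse_verification_claim_py claim → Spec_parse_verification_claim_py claim (parse_verification_claim_py claim)

-- ===== LEMMAS AND PROOFS =====

lemma singleton_prefix_of_head? {c : Char} {l : List Char} (h : l.head? = some c) :
    [c] <+: l := by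
  cases l with
  | nil => simp at h
  | cons a t => simp at h; exact ⟨t, by simp [h]⟩

lemma head?_eq_of_singleton_prefix {c : Char} {l : List Char} (h : [c] <+: l) :
    l.head? = some c := by
  obtain ⟨t, ht⟩ := h
  subst ht; rfl

-- find points at the first occurrence: characterisation used on both sides
lemma find_eq_of_prefix (cs sub : List Char) (i : Nat)
    (h1 : sub <+: cs.drop i)
    (h2 : ∀ j, j < i → ¬ sub <+: cs.drop j) :
    PySem.Chars.find cs sub = (i : Int) := by
  have hin : PySem.Chars.isIn sub cs = true :=
    (PySem.Chars.exists_prefix_drop_iff_isIn _ _).mp ⟨i, h1⟩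
  have hnn : 0 ≤ PySem.Chars.find cs sub :=
    (PySem.Chars.find_nonneg_iff cs sub).mpr ((PySem.Chars.isIn_iff_infix sub cs).mp hin)
  obtain ⟨hp, hmin⟩ := PySem.Chars.find_spec hnn
  rcases lt_trichotomy (PySem.Chars.find cs sub).toNat i with h | h | h
  · exact absurd hp (h2 _ h)
  · omega
  · exact absurd h1 (hmin _ h)

-- a token with its only ':' in last position, glued to anything: find lands on that colon
lemma find_colon_append (p rest : List Char)
    (hne : p ≠ [])
    (hlast : p[p.length - 1]? = some ':')
    (hmid : ∀ j, j < p.length - 1 → p[j]? ≠ some ':') :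
    PySem.Chars.find (p ++ rest) [':'] = ((p.length - 1 : Nat) : Int) := by
  have hlen : 0 < p.length := List.length_pos_iff.mpr hne
  apply find_eq_of_prefix
  · apply singleton_prefix_of_head?
    rw [List.head?_drop, List.getElem?_append_left (by omega)]
    exact hlast
  · intro j hj hpre
    have : (p ++ rest)[j]? = some ':' := by
      rw [← List.head?_drop]
      exact head?_eq_of_singleton_prefix hpre
    rw [List.getElem?_append_left (by omega)] at this
    exact hmid j hj this

lemma str_len_eq (p : String) : PySem.Str.len p = (p.toList.length : Int) := by
  simp [PySem.Str.len]

-- B on a text that starts with a listed prefix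
lemma B_hit (text p ct : String) (rest : List Char)
    (htl : text.toList = p.toList ++ rest)
    (hne : p.toList ≠ [])
    (hlast : p.toList[p.toList.length - 1]? = some ':')
    (hmid : ∀ j, j < p.toList.length - 1 → p.toList[j]? ≠ some ':')
    (hget : pvMapping.get? p = some ct) :
    pvParseB text = some (ct, PySem.Str.strip (PySem.Str.slice text (some (PySem.Str.len p)) none)) := by
  have hlen : 0 < p.toList.length := List.length_pos_iff.mpr hne
  have hfind : PySem.Str.find text ":" = ((p.toList.length - 1 : Nat) : Int) := by
    have : (":" : String).toList = [':'] := rfl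
    simp only [PySem.Str.find_eq, this, htl]
    exact find_colon_append _ _ hne hlast hmid
  have hsum : ((p.toList.length - 1 : Nat) : Int) + 1 = (p.toList.length : Int) := by omega
  have hkey : PySem.Str.slice text none (some (((p.toList.length - 1 : Nat) : Int) + 1)) = p := by
    apply String.toList_inj.mp
    rw [hsum]
    simp only [PySem.Str.toList_slice, PySem.Chars.slice_eq_listSlice]
    rw [PySem.List.slice_to_natCast, htl, List.take_left]
  have htail : PySem.Str.slice text (some (((p.toList.length - 1 : Nat) : Int) + 1)) none
      = PySem.Str.slice text (some (PySem.Str.len p)) none := by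
    rw [hsum, str_len_eq]
  unfold pvParseB
  rw [hfind]
  rw [if_neg (by omega)]
  rw [hkey, hget, htail]

-- a key read off the text is a prefix of the text; if text does not start with p, get? cannot hit p
lemma no_key (text p : String) (idx : Int) (h0 : 0 ≤ idx)
    (hp : PySem.Str.startswith text p = false)
    (heq : p = PySem.Str.slice text none (some (idx + 1))) : False := by
  have hpre : p.toList <+: text.toList := by
    rw [heq]
    simp only [PySem.Str.toList_slice, PySem.Chars.slice_eq_listSlice]
    rw [PySem.List.slice_to text.toList (show (0:Int) ≤ idx + 1 by omega)]
    exact List.take_prefix _ _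
  have : PySem.Str.startswith text p = true := by
    simp only [PySem.Str.startswith_eq]
    exact (PySem.Chars.startswith_iff _ _).mpr hpre
  rw [hp] at this; exact absurd this (by simp)

-- a dict whose keys all differ from the query returns none
lemma get?_mk_none {items : List (String × String)} {key : String}
    (h : ∀ pr ∈ items, pr.1 ≠ key) : (PySem.Dict.mk items).get? key = none := by
  induction items with
  | nil => rfl
  | cons a rest ih =>
    obtain ⟨k, v⟩ := a
    rw [PySem.Dict.get?_mk_cons]
    rw [if_neg]
    · exact ih fun pr hpr => h pr (List.mem_cons_of_mem _ hpr)
    · simp only [beq_iff_eq]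
      exact h (k, v) List.mem_cons_self

-- B on a text that starts with none of the prefixes
lemma B_miss (text : String)
    (h1 : ¬ PySem.Str.startswith text "file:" = true)
    (h2 : ¬ PySem.Str.startswith text "commit:" = true)
    (h3 : ¬ PySem.Str.startswith text "branch:" = true)
    (h4 : ¬ PySem.Str.startswith text "symbol:" = true)
    (h5 : ¬ PySem.Str.startswith text "diff:" = true)
    (h6 : ¬ PySem.Str.startswith text "tests:" = true)
    (h7 : ¬ PySem.Str.startswith text "decision:" = true)
    (h8 : ¬ PySem.Str.startswith text "ownership:" = true)
    (h9 : ¬ PySem.Str.startswith text "milestone:" = true)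
    (h10 : ¬ PySem.Str.startswith text "status:" = true) :
    pvParseB text = none := by
  unfold pvParseB
  by_cases hidx : PySem.Str.find text ":" = -1
  · rw [if_pos hidx]
  · rw [if_neg hidx]
    have hge : -1 ≤ PySem.Str.find text ":" := by
      simp only [PySem.Str.find_eq]
      exact PySem.Chars.neg_one_le_find _ _
    have h0 : 0 ≤ PySem.Str.find text ":" := by omega
    generalize hk : PySem.Str.slice text none (some (PySem.Str.find text ":" + 1)) = key
    have hnone : pvMapping.get? key = none := by
      have hd : pvMapping = PySem.Dict.mk
        [("file:", "file_exists"), ("commit:", "commit_exists"), ("branch:", "branch_exists"),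
         ("symbol:", "symbol_exists"), ("diff:", "diff_exists"), ("tests:", "tests_passed"),
         ("decision:", "decision_claim"), ("ownership:", "ownership_claim"),
         ("milestone:", "milestone_completed"), ("status:", "status_claim")] := by decide
      rw [hd]
      apply get?_mk_none
      intro pr hpr
      simp only [List.mem_cons, List.not_mem_nil, or_false] at hpr
      rcases hpr with rfl | rfl | rfl | rfl | rfl | rfl | rfl | rfl | rfl | rfl <;> intro heq
      · exact no_key text _ _ h0 (Bool.eq_false_iff.mpr h1) (heq.trans hk.symm)
      · exact no_key text _ _ h0 (Bool.eq_false_iff.mpr h2) (heq.trans hk.symm)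
      · exact no_key text _ _ h0 (Bool.eq_false_iff.mpr h3) (heq.trans hk.symm)
      · exact no_key text _ _ h0 (Bool.eq_false_iff.mpr h4) (heq.trans hk.symm)
      · exact no_key text _ _ h0 (Bool.eq_false_iff.mpr h5) (heq.trans hk.symm)
      · exact no_key text _ _ h0 (Bool.eq_false_iff.mpr h6) (heq.trans hk.symm)
      · exact no_key text _ _ h0 (Bool.eq_false_iff.mpr h7) (heq.trans hk.symm)
      · exact no_key text _ _ h0 (Bool.eq_false_iff.mpr h8) (heq.trans hk.symm)
      · exact no_key text _ _ h0 (Bool.eq_false_iff.mpr h9) (heq.trans hk.symm)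
      · exact no_key text _ _ h0 (Bool.eq_false_iff.mpr h10) (heq.trans hk.symm)
    rw [hnone]

lemma obtain_suffix {text p : String} (h : PySem.Str.startswith text p = true) :
    ∃ rest, text.toList = p.toList ++ rest := by
  have := (PySem.Chars.startswith_iff text.toList p.toList).mp (by simpa using h)
  obtain ⟨rest, hrest⟩ := this
  exact ⟨rest, hrest.symm⟩

lemma core (text : String) : pvLoopA pvMapping.items text = pvParseB text := by
  have hitems : pvMapping.items =
    [("file:", "file_exists"), ("commit:", "commit_exists"), ("branch:", "branch_exists"),
     ("symbol:", "symbol_exists"), ("diff:", "diff_exists"), ("tests:", "tests_passed"),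
     ("decision:", "decision_claim"), ("ownership:", "ownership_claim"),
     ("milestone:", "milestone_completed"), ("status:", "status_claim")] := by decide
  rw [hitems]
  by_cases h1 : PySem.Str.startswith text "file:" = true
  · obtain ⟨rest, htl⟩ := obtain_suffix h1
    rw [B_hit text "file:" "file_exists" rest htl (by decide) (by decide) (by decide) rfl]
    simp only [pvLoopA, h1, ite_true]
  by_cases h2 : PySem.Str.startswith text "commit:" = true
  · obtain ⟨rest, htl⟩ := obtain_suffix h2
    rw [B_hit text "commit:" "commit_exists" rest htl (by decide) (by decide) (by decide) rfl]
    simp only [pvLoopA, h1, h2, Bool.false_eq_true, ite_true, ite_false]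
  by_cases h3 : PySem.Str.startswith text "branch:" = true
  · obtain ⟨rest, htl⟩ := obtain_suffix h3
    rw [B_hit text "branch:" "branch_exists" rest htl (by decide) (by decide) (by decide) rfl]
    simp only [pvLoopA, h1, h2, h3, Bool.false_eq_true, ite_true, ite_false]
  by_cases h4 : PySem.Str.startswith text "symbol:" = true
  · obtain ⟨rest, htl⟩ := obtain_suffix h4
    rw [B_hit text "symbol:" "symbol_exists" rest htl (by decide) (by decide) (by decide) rfl]
    simp only [pvLoopA, h1, h2, h3, h4, Bool.false_eq_true, ite_true, ite_false]
  by_cases h5 : PySem.Str.startswith text "diff:" = true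
  · obtain ⟨rest, htl⟩ := obtain_suffix h5
    rw [B_hit text "diff:" "diff_exists" rest htl (by decide) (by decide) (by decide) rfl]
    simp only [pvLoopA, h1, h2, h3, h4, h5, Bool.false_eq_true, ite_true, ite_false]
  by_cases h6 : PySem.Str.startswith text "tests:" = true
  · obtain ⟨rest, htl⟩ := obtain_suffix h6
    rw [B_hit text "tests:" "tests_passed" rest htl (by decide) (by decide) (by decide) rfl]
    simp only [pvLoopA, h1, h2, h3, h4, h5, h6, Bool.false_eq_true, ite_true, ite_false]
  by_cases h7 : PySem.Str.startswith text "decision:" = true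
  · obtain ⟨rest, htl⟩ := obtain_suffix h7
    rw [B_hit text "decision:" "decision_claim" rest htl (by decide) (by decide) (by decide) rfl]
    simp only [pvLoopA, h1, h2, h3, h4, h5, h6, h7, Bool.false_eq_true, ite_true, ite_false]
  by_cases h8 : PySem.Str.startswith text "ownership:" = true
  · obtain ⟨rest, htl⟩ := obtain_suffix h8
    rw [B_hit text "ownership:" "ownership_claim" rest htl (by decide) (by decide) (by decide) rfl]
    simp only [pvLoopA, h1, h2, h3, h4, h5, h6, h7, h8, Bool.false_eq_true, ite_true, ite_false]
  by_cases h9 : PySem.Str.startswith text "milestone:" = true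
  · obtain ⟨rest, htl⟩ := obtain_suffix h9
    rw [B_hit text "milestone:" "milestone_completed" rest htl (by decide) (by decide) (by decide) rfl]
    simp only [pvLoopA, h1, h2, h3, h4, h5, h6, h7, h8, h9, Bool.false_eq_true, ite_true, ite_false]
  by_cases h10 : PySem.Str.startswith text "status:" = true
  · obtain ⟨rest, htl⟩ := obtain_suffix h10
    rw [B_hit text "status:" "status_claim" rest htl (by decide) (by decide) (by decide) rfl]
    simp only [pvLoopA, h1, h2, h3, h4, h5, h6, h7, h8, h9, h10, Bool.false_eq_true, ite_true, ite_false]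
  · rw [B_miss text h1 h2 h3 h4 h5 h6 h7 h8 h9 h10]
    simp only [pvLoopA, h1, h2, h3, h4, h5, h6, h7, h8, h9, h10, Bool.false_eq_true, ite_false]

-- ===== VERDICT (by name: the statement is the Claim_ definition above) =====
theorem parse_verification_claim_py_spec : Claim_equal_parse_verification_claim_py := by
  intro claim _
  unfold Spec_parse_verification_claim_py parse_verification_claim_py parse_verification_claim_py_alt
  exact core (PySem.Str.strip claim)
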